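-- pv_equiv track=rewrite | github.com/ku-wolf/code_interview | code_interview/chapter2/partition.py | correct_partition
-- ===== SOURCE A (Python) =====
-- def correct_partition(ll, v):
--     greater_equal = False
--     for val in ll:
--         if not greater_equal:
--             if val < v:
--                 continue
--             else:
--                 greater_equal = True
--         else:
--             if val < v:
--                 return False
--     return True
-- ===== SOURCE B (Python) =====
-- def correct_partition(ll, v):
--     c = sum(1 for val in ll if val < v)
--     return all(val < v for val in ll[:c])
-- ===== Notes on version B (the rewrite author's own statement) =====
-- stated objective: alternative
-- what changed: Replaces A's stateful flag loop by a counting characterization: count c = number of elements < v, then check that the first c positions are exactly the elements < v (the list is partitioned iff all small elements occupy the prefix of length c).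
import Mathlib
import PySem

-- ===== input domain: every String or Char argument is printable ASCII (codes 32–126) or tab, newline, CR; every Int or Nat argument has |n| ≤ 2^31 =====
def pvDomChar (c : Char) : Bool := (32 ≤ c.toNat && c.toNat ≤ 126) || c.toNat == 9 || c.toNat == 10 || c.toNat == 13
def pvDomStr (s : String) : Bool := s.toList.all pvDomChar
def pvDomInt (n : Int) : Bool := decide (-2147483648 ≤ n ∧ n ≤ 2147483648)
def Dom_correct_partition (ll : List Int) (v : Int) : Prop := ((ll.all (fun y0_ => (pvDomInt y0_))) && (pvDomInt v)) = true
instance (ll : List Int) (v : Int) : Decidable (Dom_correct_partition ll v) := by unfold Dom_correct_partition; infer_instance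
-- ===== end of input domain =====

-- B replaces A's flag loop by a counting characterization (count elements < v, check they fill the prefix); objective: alternative.

-- ===== PORT A =====
-- loop over ll with the mutable flag greater_equal; the early 'return False' is the recursion's result
def correct_partition_loop (v : Int) : List Int → Bool → Bool
  | [], _ => true
  | val :: rest, ge =>
    if !ge then
      if val < v then correct_partition_loop v rest ge
      else correct_partition_loop v rest true
    else
      if val < v then false
      else correct_partition_loop v rest ge

def correct_partition (ll : List Int) (v : Int) : Bool :=
  correct_partition_loop v ll false

-- ===== PORT B =====
def correct_partition_alt (ll : List Int) (v : Int) : Bool :=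
  let c : Nat := ll.countP (fun val => val < v)   -- sum(1 for val in ll if val < v)
  (ll.take c).all (fun val => val < v)

-- ===== PRECONDITION & SPEC =====
def Spec_correct_partition (ll : List Int) (v : Int) (out : Bool) : Prop := out = correct_partition_alt ll v
instance (ll : List Int) (v : Int) (out : Bool) : Decidable (Spec_correct_partition ll v out) := by unfold Spec_correct_partition; infer_instance

-- ===== CLAIM (what is proved, stated in full; the proofs are below) =====
def Claim_equal_correct_partition : Prop := ∀ (ll : List Int) (v : Int), Dom_correct_partition ll v → Spec_correct_partition ll v (correct_partition ll v)

-- ===== LEMMAS AND PROOFS =====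

theorem correct_partition_loop_true (v : Int) (ll : List Int) :
    correct_partition_loop v ll true = ll.all (fun val => !(val < v)) := by
  induction ll with
  | nil => rfl
  | cons val rest ih =>
    simp only [correct_partition_loop, List.all_cons]
    by_cases h : val < v <;> simp [h, ih]

theorem correct_partition_eq_alt (v : Int) (ll : List Int) :
    correct_partition_loop v ll false = correct_partition_alt ll v := by
  induction ll with
  | nil => rfl
  | cons val rest ih =>
    by_cases h : val < v
    · have hA : correct_partition_loop v (val :: rest) false
          = correct_partition_loop v rest false := by
        simp [correct_partition_loop, h]
      rw [hA, ih]
      simp [correct_partition_alt, h, List.take_succ_cons]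
    · have hA : correct_partition_loop v (val :: rest) false
          = rest.all (fun x => !(x < v)) := by
        simp [correct_partition_loop, h, correct_partition_loop_true]
      have hd : (decide (val < v)) = false := by simpa using h
      rw [hA]
      unfold correct_partition_alt
      simp only [List.countP_cons, hd, if_false, Nat.add_zero, Bool.false_eq_true]
      rcases Nat.eq_zero_or_pos (rest.countP (fun x => decide (x < v))) with hc | hc
      · have h0 : ∀ x ∈ rest, ¬ (x < v) := by
          intro x hx
          have := List.countP_eq_zero.mp hc x hx
          simpa using this
        rw [hc]
        simp only [List.take_zero, List.all_nil, List.all_eq_true]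
        intro x hx
        simpa using h0 x hx
      · have hne : ∃ a ∈ rest, decide (a < v) = true := by
          by_contra hcon
          have h0 : rest.countP (fun x => decide (x < v)) = 0 :=
            List.countP_eq_zero.mpr (by
              intro a ha
              by_contra hb
              exact hcon ⟨a, ha, by simpa using hb⟩)
          omega
        obtain ⟨x, hx, hxv⟩ := hne
        have hL : rest.all (fun x => !(x < v)) = false := by
          simp only [List.all_eq_false]
          exact ⟨x, hx, by simpa using hxv⟩
        obtain ⟨k, hk⟩ : ∃ k, rest.countP (fun x => decide (x < v)) = k + 1 :=
          ⟨_, (Nat.succ_pred_eq_of_pos hc).symm⟩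
        have hR : ((val :: rest).take (rest.countP (fun x => decide (x < v)))).all
            (fun x => decide (x < v)) = false := by
          rw [hk, List.take_succ_cons]
          simp [hd]
        rw [hL, hR]

-- ===== VERDICT (by name: the statement is the Claim_ definition above) =====
theorem correct_partition_spec : Claim_equal_correct_partition := by
  intro ll v _
  unfold Spec_correct_partition correct_partition
  exact correct_partition_eq_alt v ll
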